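-- pv_equiv track=rewrite | github.com/tpalko/budget-badger | budget/4.0.5/budget/web/viewutil.py | _get_heatmap_region_lookup
-- ===== SOURCE A (Python) =====
-- def _get_heatmap_region_lookup(heatmap):
--
--     heatmap_region_lookup = {}
--     region_index = 0
--     in_region = False
--     gap_threshold = 2
--     gap = 0
--     for day in [ str(day) for day in range(1, 32) ]:
--         if day in heatmap and int(heatmap[day]) > 0:
--             gap = 0
--             if not in_region:
--                 in_region = True
--                 region_index += 1
--             # if region_index not in heatmap_regions:
--             #     heatmap_regions[region_index] = []
--             heatmap_region_lookup[day] = region_index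
--         else:
--             heatmap_region_lookup[day] = 0
--             gap += 1
--             if gap >= gap_threshold and in_region:
--                 in_region = False
--
--     return heatmap_region_lookup
-- ===== SOURCE B (Python) =====
-- def _get_heatmap_region_lookup(heatmap):
--     active = [d for d in range(1, 32) if str(d) in heatmap and int(heatmap[str(d)]) > 0]
--     regions = {}
--     prev = None
--     idx = 0
--     for d in active:
--         if prev is None or d - prev >= 3:
--             idx += 1
--         regions[d] = idx
--         prev = d
--     return {str(d): regions.get(d, 0) for d in range(1, 32)}
-- ===== Notes on version B (the rewrite author's own statement) =====
-- stated objective: alternative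
-- what changed: B first extracts the ordered list of active days and segments it by gaps (new region iff the previous active day is >= 3 away), then renders the 31-day table by lookup, replacing A's day-by-day walk that threads in_region/gap state through every day.
import Mathlib
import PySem

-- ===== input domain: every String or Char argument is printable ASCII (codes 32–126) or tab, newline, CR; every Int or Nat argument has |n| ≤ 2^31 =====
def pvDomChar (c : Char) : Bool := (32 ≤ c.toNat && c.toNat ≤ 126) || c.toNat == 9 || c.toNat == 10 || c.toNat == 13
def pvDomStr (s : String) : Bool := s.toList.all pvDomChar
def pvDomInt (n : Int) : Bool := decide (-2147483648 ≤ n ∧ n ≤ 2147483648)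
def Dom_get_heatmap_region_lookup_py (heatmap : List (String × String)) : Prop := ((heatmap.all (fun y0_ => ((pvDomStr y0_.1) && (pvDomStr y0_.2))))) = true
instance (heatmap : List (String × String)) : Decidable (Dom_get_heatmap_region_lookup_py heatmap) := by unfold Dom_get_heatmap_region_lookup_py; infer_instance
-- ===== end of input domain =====

-- B re-segments the month by gaps between the ACTIVE days (new region iff the previous
-- active day is ≥ 3 away) instead of A's day-by-day walk with in_region/gap state;
-- objective: alternative decomposition, same cost. Equality is about the return value.

-- ===== PORT A =====
-- the test 'day in heatmap and int(heatmap[day]) > 0' (shared verbatim by both Pythons);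
-- '.getD 0' is only reached when int() would raise ValueError, which Pre_ excludes
def pvActive (hm : PySem.Dict String String) (day : String) : Bool :=
  hm.contains day && ((PySem.Int.ofStr? (hm.getD day "")).getD 0 > 0)

-- loop body of A: state (heatmap_region_lookup, region_index, in_region, gap)
def stepA (hm : PySem.Dict String String)
    (st : PySem.Dict String Int × Int × Bool × Int) (day : String) :
    PySem.Dict String Int × Int × Bool × Int :=
  let (lookup, region_index, in_region, gap) := st
  if pvActive hm day then
    let gap := 0
    let (in_region, region_index) :=
      if !in_region then (true, region_index + 1) else (in_region, region_index)
    (lookup.insert day region_index, region_index, in_region, gap)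
  else
    let lookup := lookup.insert day 0
    let gap := gap + 1
    let in_region := if gap ≥ 2 && in_region then false else in_region
    (lookup, region_index, in_region, gap)

def get_heatmap_region_lookup_py (heatmap : List (String × String)) : List (String × Int) :=
  let hm := PySem.Dict.mk heatmap
  (((PySem.List.pyRange 1 32 1).map (fun day => PySem.Int.toStr day)).foldl
      (stepA hm) (PySem.Dict.empty, 0, false, 0)).1.items

-- ===== PORT B =====
-- loop body of B: state (regions, prev, idx)
def stepB (st : PySem.Dict Int Int × Option Int × Int) (d : Int) :
    PySem.Dict Int Int × Option Int × Int :=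
  let (regions, prev, idx) := st
  let idx := if (match prev with | none => true | some p => d - p ≥ 3) then idx + 1 else idx
  (regions.insert d idx, some d, idx)

def get_heatmap_region_lookup_py_alt (heatmap : List (String × String)) : List (String × Int) :=
  let hm := PySem.Dict.mk heatmap
  let active := (PySem.List.pyRange 1 32 1).filter (fun d => pvActive hm (PySem.Int.toStr d))
  let regions := (active.foldl stepB (PySem.Dict.empty, none, 0)).1
  (PySem.List.pyRange 1 32 1).map (fun d => (PySem.Int.toStr d, regions.getD d 0))

-- ===== PRECONDITION & SPEC =====
-- Pre_ excludes exactly the inputs on which Python A raises ValueError: a day key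
-- "1".."31" whose (first-match) value is not int()-parseable.
def Pre_get_heatmap_region_lookup_py (heatmap : List (String × String)) : Prop :=
  ((PySem.List.pyRange 1 32 1).all (fun d =>
    match (PySem.Dict.mk heatmap).get? (PySem.Int.toStr d) with
    | some v => (PySem.Int.ofStr? v).isSome
    | none => true)) = true
instance (heatmap : List (String × String)) : Decidable (Pre_get_heatmap_region_lookup_py heatmap) := by
  unfold Pre_get_heatmap_region_lookup_py; infer_instance

def pvWitness_get_heatmap_region_lookup_py : (List (String × String)) :=
  [("1", "2"), ("3", " 1 "), ("7", "0")]

def Spec_get_heatmap_region_lookup_py (heatmap : List (String × String)) (out : List (String × Int)) : Prop := out = get_heatmap_region_lookup_py_alt heatmap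
instance (heatmap : List (String × String)) (out : List (String × Int)) : Decidable (Spec_get_heatmap_region_lookup_py heatmap out) := by unfold Spec_get_heatmap_region_lookup_py; infer_instance

-- ===== CLAIM (what is proved, stated in full; the proofs are below) =====
def Claim_equal_get_heatmap_region_lookup_py : Prop := ∀ (heatmap : List (String × String)), Dom_get_heatmap_region_lookup_py heatmap → Pre_get_heatmap_region_lookup_py heatmap → Spec_get_heatmap_region_lookup_py heatmap (get_heatmap_region_lookup_py heatmap)

-- ===== LEMMAS AND PROOFS =====

-- 'a new region starts at d': no previous active day, or it is ≥ 3 away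
def newReg (prev : Option Int) (d : Int) : Bool :=
  match prev with | none => true | some p => decide (d - p ≥ 3)

-- common reference: per-day output values, driven by the active predicate,
-- carrying the running region counter and the previous active day
def specGo (act : Int → Bool) : List Int → Int → Option Int → List (String × Int)
  | [], _, _ => []
  | d :: ds, c, prev =>
    if act d then
      let c' := if newReg prev d then c + 1 else c
      (PySem.Int.toStr d, c') :: specGo act ds c' (some d)
    else
      (PySem.Int.toStr d, 0) :: specGo act ds c prev

-- the association list B's region fold builds
def regionsGo : List Int → Int → Option Int → List (Int × Int)
  | [], _, _ => []
  | d :: ds, c, prev =>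
    let c' := if newReg prev d then c + 1 else c
    (d, c') :: regionsGo ds c' (some d)

theorem regionsGo_keys (as : List Int) : ∀ (c : Int) (prev : Option Int),
    (regionsGo as c prev).map Prod.fst = as := by
  induction as with
  | nil => intro c prev; rfl
  | cons d ds ih => intro c prev; simp [regionsGo, ih]

theorem A_go (hm : PySem.Dict String String) (n : Nat) :
    ∀ (d0 : Int) (acc : PySem.Dict String Int) (ri : Int) (inR : Bool) (gap : Int)
      (prev : Option Int),
    (∀ e e' : Int, d0 ≤ e → e < d0 + n → d0 ≤ e' → e' < d0 + n → PySem.Int.toStr e = PySem.Int.toStr e' → e = e') →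
    (∀ e : Int, d0 ≤ e → e < d0 + n → acc.contains (PySem.Int.toStr e) = false) →
    (match prev with
     | none => inR = false
     | some p => inR = decide (d0 - p ≤ 2) ∧ (inR = true → gap = d0 - 1 - p)) →
    (((PySem.List.pyRange d0 (d0 + n) 1).map (fun day => PySem.Int.toStr day)).foldl
        (stepA hm) (acc, ri, inR, gap)).1.items
      = acc.items ++ specGo (fun d => pvActive hm (PySem.Int.toStr d)) (PySem.List.pyRange d0 (d0 + n) 1) ri prev := by
  induction n with
  | zero =>
    intro d0 acc ri inR gap prev _ _ _
    rw [show d0 + ((0:ℕ):ℤ) = d0 by simp, PySem.List.pyRange_one_eq_nil (le_refl d0)]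
    simp [specGo]
  | succ n ih =>
    intro d0 acc ri inR gap prev hinj hfr hinv
    have hb : d0 + ((n+1:ℕ):ℤ) = (d0+1) + (n:ℤ) := by push_cast; ring
    rw [hb, PySem.List.pyRange_one_cons (by omega)]
    simp only [List.map_cons, List.foldl_cons, specGo]
    have hinj' : ∀ e e' : Int, d0+1 ≤ e → e < (d0+1) + (n:ℤ) → d0+1 ≤ e' → e' < (d0+1) + (n:ℤ) →
        PySem.Int.toStr e = PySem.Int.toStr e' → e = e' :=
      fun e e' he hb1 he' hb2 h => hinj e e' (by omega) (by omega) (by omega) (by omega) h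
    have hne : ∀ e : Int, d0+1 ≤ e → e < (d0+1) + (n:ℤ) → (PySem.Int.toStr e == PySem.Int.toStr d0) = false := by
      intro e he hb1
      simp only [beq_eq_false_iff_ne]
      intro h
      have := hinj e d0 (by omega) (by omega) (by omega) (by omega) h
      omega
    by_cases hact : pvActive hm (PySem.Int.toStr d0) = true
    · have hstep : stepA hm (acc, ri, inR, gap) (PySem.Int.toStr d0)
          = (acc.insert (PySem.Int.toStr d0) (if !inR then ri+1 else ri),
             (if !inR then ri+1 else ri), true, 0) := by
        cases inR <;> simp [stepA, hact]
      have hc : (if newReg prev d0 then ri+1 else ri) = (if !inR then ri+1 else ri) := by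
        cases prev with
        | none =>
          have h1 : inR = false := hinv
          subst h1
          simp [newReg]
        | some p =>
          obtain ⟨h1, _⟩ := hinv
          subst h1
          simp only [newReg]
          by_cases h : d0 - p ≥ 3
          · rw [if_pos (by simpa using h), if_pos (by simp; omega)]
          · rw [if_neg (by simpa using h), if_neg (by simp; omega)]
      rw [hstep, if_pos hact, hc,
          ih (d0+1) _ _ _ _ (some d0) hinj' ?_ ?_]
      · rw [PySem.Dict.items_insert, hfr d0 (le_refl d0) (by omega)]
        simp
      · intro e he hb1
        rw [PySem.Dict.contains_insert, hne e he hb1, hfr e (by omega) (by omega)]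
        simp
      · refine ⟨by norm_num, fun _ => by ring⟩
    · have hstep : stepA hm (acc, ri, inR, gap) (PySem.Int.toStr d0)
          = (acc.insert (PySem.Int.toStr d0) 0, ri,
             (if gap + 1 ≥ 2 && inR then false else inR), gap + 1) := by
        simp [stepA, hact]
      rw [hstep, if_neg hact, ih (d0+1) _ _ _ _ prev hinj' ?_ ?_]
      · rw [PySem.Dict.items_insert, hfr d0 (le_refl d0) (by omega)]
        simp
      · intro e he hb1
        rw [PySem.Dict.contains_insert, hne e he hb1, hfr e (by omega) (by omega)]
        simp
      · cases prev with
        | none =>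
          have h1 : inR = false := hinv
          subst h1
          simp
        | some p =>
          obtain ⟨h1, h2⟩ := hinv
          by_cases hle : d0 - p ≤ 2
          · have hR : inR = true := by rw [h1]; simpa using hle
            have hg : gap = d0 - 1 - p := h2 hR
            subst hg
            subst hR
            by_cases h2' : d0 - 1 - p + 1 ≥ 2
            · refine ⟨?_, ?_⟩
              · simp [h2']
                omega
              · intro hfalse
                simp [h2'] at hfalse
            · refine ⟨?_, ?_⟩
              · simp [h2']
                omega
              · intro _
                omega
          · have hR : inR = false := by rw [h1]; simpa using hle
            subst hR
            refine ⟨?_, ?_⟩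
            · simp
              omega
            · intro hfalse
              simp at hfalse

theorem B_go : ∀ (as : List Int) (r : PySem.Dict Int Int) (prev : Option Int) (c : Int),
    as.Nodup → (∀ a ∈ as, r.contains a = false) →
    (as.foldl stepB (r, prev, c)).1.items = r.items ++ regionsGo as c prev := by
  intro as
  induction as with
  | nil => intro r prev c _ _; simp [regionsGo]
  | cons d ds ih =>
    intro r prev c hnd hfr
    have hd : r.contains d = false := hfr d (by simp)
    have hnd' : ds.Nodup := (List.nodup_cons.mp hnd).2
    have hdm : d ∉ ds := (List.nodup_cons.mp hnd).1
    simp only [List.foldl_cons, regionsGo]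
    rw [show stepB (r, prev, c) d
        = (r.insert d (if newReg prev d then c + 1 else c), some d,
           (if newReg prev d then c + 1 else c)) from rfl]
    rw [ih _ _ _ hnd' ?_]
    · rw [PySem.Dict.items_insert, hd]
      simp
    · intro a ha
      rw [PySem.Dict.contains_insert]
      have : (a == d) = false := by
        simp only [beq_eq_false_iff_ne]; intro h; exact hdm (h ▸ ha)
      rw [this, hfr a (by simp [ha])]
      simp

theorem C_go (act : Int → Bool) : ∀ (ds : List Int) (c : Int) (prev : Option Int),
    ds.Nodup →
    ds.map (fun d => (PySem.Int.toStr d, (PySem.Dict.mk (regionsGo (ds.filter (fun d => act d)) c prev)).getD d 0))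
      = specGo act ds c prev := by
  intro ds
  induction ds with
  | nil => intro c prev _; rfl
  | cons d rest ih =>
    intro c prev hnd
    have hnd' : rest.Nodup := (List.nodup_cons.mp hnd).2
    have hdm : d ∉ rest := (List.nodup_cons.mp hnd).1
    by_cases hd : act d = true
    · simp only [List.filter_cons, hd, if_pos, List.map_cons, specGo, regionsGo]
      congr 1
      · rw [PySem.Dict.getD_eq_get?_getD, PySem.Dict.get?_mk_cons]
        simp
      · rw [← ih _ _ hnd']
        apply List.map_congr_left
        intro e he
        have : (d == e) = false := by
          simp only [beq_eq_false_iff_ne]; intro h; exact hdm (h ▸ he)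
        rw [PySem.Dict.getD_eq_get?_getD, PySem.Dict.get?_mk_cons, this]
        simp [PySem.Dict.getD_eq_get?_getD]
    · simp only [List.filter_cons, hd, List.map_cons, specGo, if_neg, Bool.false_eq_true,
        not_false_iff]
      congr 1
      · have hkeys : (PySem.Dict.mk (regionsGo (rest.filter (fun d => act d)) c prev)).get? d = none := by
          rw [PySem.Dict.get?_eq_none_iff_not_mem_keys]
          intro hmem
          have : d ∈ (regionsGo (rest.filter (fun d => act d)) c prev).map Prod.fst := by
            simpa [PySem.Dict.keys] using hmem
          rw [regionsGo_keys] at this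
          exact hdm (List.mem_of_mem_filter this)
        rw [PySem.Dict.getD_eq_get?_getD, hkeys]
        rfl
      · exact ih _ _ hnd' 

-- ===== VERDICT (by name: the statement is the Claim_ definition above) =====
theorem get_heatmap_region_lookup_py_spec : Claim_equal_get_heatmap_region_lookup_py := by
  intro heatmap _ _
  show get_heatmap_region_lookup_py heatmap = get_heatmap_region_lookup_py_alt heatmap
  simp only [get_heatmap_region_lookup_py, get_heatmap_region_lookup_py_alt]
  have hinj : ∀ e e' : Int, 1 ≤ e → e < 32 → 1 ≤ e' → e' < 32 →
      PySem.Int.toStr e = PySem.Int.toStr e' → e = e' := by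
    have hd : ∀ x ∈ PySem.List.pyRange 1 32 1, ∀ y ∈ PySem.List.pyRange 1 32 1,
        PySem.Int.toStr x = PySem.Int.toStr y → x = y := by decide
    intro e e' h1 h2 h3 h4
    exact hd e (by rw [PySem.List.mem_pyRange_one]; omega) e'
      (by rw [PySem.List.mem_pyRange_one]; omega)
  have h32 : (32:ℤ) = 1 + ((31:ℕ):ℤ) := by norm_num
  rw [h32]
  rw [A_go (PySem.Dict.mk heatmap) 31 1 PySem.Dict.empty 0 false 0 none
      (fun e e' a b c d h => hinj e e' (by omega) (by omega) (by omega) (by omega) h)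
      (fun e _ _ => PySem.Dict.contains_empty _) rfl]
  have hndL : ((PySem.List.pyRange 1 (1 + ((31:ℕ):ℤ)) 1).filter
      (fun d => pvActive (PySem.Dict.mk heatmap) (PySem.Int.toStr d))).Nodup :=
    (PySem.List.nodup_pyRange_one _ _).filter _
  have hfold := B_go ((PySem.List.pyRange 1 (1 + ((31:ℕ):ℤ)) 1).filter
      (fun d => pvActive (PySem.Dict.mk heatmap) (PySem.Int.toStr d)))
      PySem.Dict.empty none 0 hndL (fun a _ => PySem.Dict.contains_empty _)
  have hmk : (((PySem.List.pyRange 1 (1 + ((31:ℕ):ℤ)) 1).filter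
        (fun d => pvActive (PySem.Dict.mk heatmap) (PySem.Int.toStr d))).foldl stepB
        (PySem.Dict.empty, none, 0)).1
      = PySem.Dict.mk (regionsGo ((PySem.List.pyRange 1 (1 + ((31:ℕ):ℤ)) 1).filter
        (fun d => pvActive (PySem.Dict.mk heatmap) (PySem.Int.toStr d))) 0 none) := by
    apply PySem.Dict.ext
    rw [hfold]
    rfl
  rw [hmk]
  rw [C_go (fun d => pvActive (PySem.Dict.mk heatmap) (PySem.Int.toStr d))
      (PySem.List.pyRange 1 (1 + ((31:ℕ):ℤ)) 1) 0 none (PySem.List.nodup_pyRange_one _ _)]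
  rfl
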